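-- pv_equiv track=rewrite | github.com/cerontang/rhdhv_geostudio | src/stratigraphy.py | assign_block_points
-- ===== SOURCE A (Python) =====
-- def assign_block_points(polygon_points, strat_elev):
--     strat_elev.sort()
--     result_polygons = []
--     for i in range(len(strat_elev) - 1):
--         polygon = []
--         for point in polygon_points:
--             if strat_elev[i] <= point[1] <= strat_elev[i + 1]:
--                 polygon.append(point)
--         result_polygons.append(polygon)
--     return result_polygons
-- ===== SOURCE B (Python) =====
-- def assign_block_points(polygon_points, strat_elev):
--     # Note: like A, this sorts strat_elev in place.
--     strat_elev.sort()
--     n = len(strat_elev)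
--     if n < 2:
--         return []
--     bands = [[] for _ in range(n - 1)]
--     for point in polygon_points:
--         y = point[1]
--         lo = sum(1 for e in strat_elev if e < y) - 1
--         if lo < 0:
--             lo = 0
--         hi = sum(1 for e in strat_elev if e <= y)
--         if hi > n - 1:
--             hi = n - 1
--         for i in range(lo, hi):
--             bands[i].append(point)
--     return bands
-- ===== Notes on version B (the rewrite author's own statement) =====
-- stated objective: alternative
-- what changed: A scans all points once per elevation band (band-major nested loops building each band by filtering); B makes a single point-major pass, computing each point's contiguous band range from rank counts in the sorted elevation list and appending it to exactly those bands.
import Mathlib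
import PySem

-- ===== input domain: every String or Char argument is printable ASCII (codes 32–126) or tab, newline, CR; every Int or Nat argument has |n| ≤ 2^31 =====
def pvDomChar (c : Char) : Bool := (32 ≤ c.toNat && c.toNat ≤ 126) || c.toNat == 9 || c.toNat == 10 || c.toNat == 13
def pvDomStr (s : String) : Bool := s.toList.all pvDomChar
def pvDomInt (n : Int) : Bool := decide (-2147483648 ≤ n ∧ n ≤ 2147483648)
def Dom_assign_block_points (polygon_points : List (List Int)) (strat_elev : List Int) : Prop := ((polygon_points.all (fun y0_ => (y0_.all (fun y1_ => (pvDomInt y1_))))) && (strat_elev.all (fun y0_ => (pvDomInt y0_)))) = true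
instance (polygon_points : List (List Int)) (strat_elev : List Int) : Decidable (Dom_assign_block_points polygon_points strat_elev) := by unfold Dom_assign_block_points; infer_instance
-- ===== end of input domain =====

-- B replaces A's band-major double scan (for each elevation band, scan all points) by a single
-- point-major pass: each point's contiguous band range is computed from rank counts in the sorted
-- elevation list and the point is appended to exactly those bands (objective: alternative).
-- Both A and B sort strat_elev in place (same observable mutation); the theorems are about the return value.

-- ===== PORT A =====
def assign_block_points (polygon_points : List (List Int)) (strat_elev : List Int) : List (List (List Int)) :=
  let s := PySem.List.sorted strat_elev (fun x => x)
  (PySem.List.pyRange 0 ((s.length : Int) - 1)).foldl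
    (fun result_polygons i =>
      result_polygons ++
        [polygon_points.foldl
          (fun polygon point =>
            if PySem.List.pyGetD s i 0 ≤ PySem.List.pyGetD point 1 0 ∧
               PySem.List.pyGetD point 1 0 ≤ PySem.List.pyGetD s (i + 1) 0
            then polygon ++ [point] else polygon)
          []])
    []

-- ===== PORT B =====
def assign_block_points_alt (polygon_points : List (List Int)) (strat_elev : List Int) : List (List (List Int)) :=
  let s := PySem.List.sorted strat_elev (fun x => x)
  let n : Int := s.length
  if n < 2 then []
  else
    polygon_points.foldl
      (fun bands point =>
        let y := PySem.List.pyGetD point 1 0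
        let lo0 := (s.map (fun e => if e < y then (1 : Int) else 0)).sum - 1
        let lo := if lo0 < 0 then 0 else lo0
        let hi0 := (s.map (fun e => if e ≤ y then (1 : Int) else 0)).sum
        let hi := if n - 1 < hi0 then n - 1 else hi0
        (PySem.List.pyRange lo hi).foldl
          (fun bands i =>
            PySem.List.pySetD bands i (PySem.List.pyGetD bands i [] ++ [point]))
          bands)
      (List.replicate (n - 1).toNat [])

-- ===== PRECONDITION & SPEC =====
-- Pre_ excludes exactly the inputs where Python A raises IndexError: when there are at least two
-- elevations (so the band loop runs), every point must have an index-1 coordinate.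
def Pre_assign_block_points (polygon_points : List (List Int)) (strat_elev : List Int) : Prop :=
  2 ≤ strat_elev.length → ∀ p ∈ polygon_points, 2 ≤ p.length
instance (polygon_points : List (List Int)) (strat_elev : List Int) : Decidable (Pre_assign_block_points polygon_points strat_elev) := by unfold Pre_assign_block_points; infer_instance

def pvWitness_assign_block_points : List (List Int) × List Int := ([[0, 1], [3, 4]], [0, 2, 5])

def Spec_assign_block_points (polygon_points : List (List Int)) (strat_elev : List Int) (out : List (List (List Int))) : Prop := out = assign_block_points_alt polygon_points strat_elev
instance (polygon_points : List (List Int)) (strat_elev : List Int) (out : List (List (List Int))) : Decidable (Spec_assign_block_points polygon_points strat_elev out) := by unfold Spec_assign_block_points; infer_instance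

-- ===== CLAIM (what is proved, stated in full; the proofs are below) =====
def Claim_equal_assign_block_points : Prop := ∀ (polygon_points : List (List Int)) (strat_elev : List Int), Dom_assign_block_points polygon_points strat_elev → Pre_assign_block_points polygon_points strat_elev → Spec_assign_block_points polygon_points strat_elev (assign_block_points polygon_points strat_elev)

-- ===== LEMMAS AND PROOFS =====

-- counting in a sorted list: s[j] ≤ y iff fewer than j+1 elements are ≤ y
theorem sorted_le_iff_lt_countP (s : List Int) (y : Int)
    (hs : s.Pairwise (fun a b => a ≤ b)) (j : Nat) (hj : j < s.length) :
    (s[j] ≤ y ↔ j < s.countP (fun e => decide (e ≤ y))) := by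
  induction s generalizing j with
  | nil => simp at hj
  | cons x t ih =>
    rw [List.pairwise_cons] at hs
    obtain ⟨hx, ht⟩ := hs
    cases j with
    | zero =>
      simp only [List.getElem_cons_zero, List.countP_cons]
      constructor
      · intro h; simp [h]
      · intro h
        by_contra hxy
        push Not at hxy
        have h0 : t.countP (fun e => decide (e ≤ y)) = 0 :=
          List.countP_eq_zero.mpr (fun e he => by
            have := hx e he; simp; omega)
        simp only [h0] at h
        have : ¬ (decide (x ≤ y) = true) := by simpa using hxy
        simp [this] at h
    | succ k =>
      simp only [List.getElem_cons_succ, List.countP_cons]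
      have hk : k < t.length := by simpa using hj
      rw [ih ht k hk]
      by_cases hxy : x ≤ y
      · simp [hxy]
      · have h0 : t.countP (fun e => decide (e ≤ y)) = 0 :=
          List.countP_eq_zero.mpr (fun e he => by
            have := hx e he; simp; omega)
        have : ¬ t[k] ≤ y := by
          have := hx t[k] (t.getElem_mem hk); omega
        simp [hxy, h0]

-- counting in a sorted list: y ≤ s[j] iff at most j elements are < y
theorem sorted_ge_iff_countP_le (s : List Int) (y : Int)
    (hs : s.Pairwise (fun a b => a ≤ b)) (j : Nat) (hj : j < s.length) :
    (y ≤ s[j] ↔ s.countP (fun e => decide (e < y)) ≤ j) := by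
  induction s generalizing j with
  | nil => simp at hj
  | cons x t ih =>
    rw [List.pairwise_cons] at hs
    obtain ⟨hx, ht⟩ := hs
    cases j with
    | zero =>
      simp only [List.getElem_cons_zero, List.countP_cons]
      constructor
      · intro h
        have h0 : t.countP (fun e => decide (e < y)) = 0 :=
          List.countP_eq_zero.mpr (fun e he => by
            have := hx e he; simp; omega)
        simp [h0]; omega
      · intro h
        by_contra hxy
        push Not at hxy
        simp [hxy] at h
    | succ k =>
      simp only [List.getElem_cons_succ, List.countP_cons]
      have hk : k < t.length := by simpa using hj
      rw [ih ht k hk]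
      by_cases hxy : x < y
      · simp [hxy]
      · have hyk : y ≤ t[k] := by
          have := hx t[k] (t.getElem_mem hk); omega
        have h0 : t.countP (fun e => decide (e < y)) ≤ t.length := List.countP_le_length
        simp [hxy]
        rw [ih ht k hk] at hyk
        omega

-- the append-to-a-range-of-bands inner loop of B preserves the number of bands
theorem foldl_pySetD_length (point : List Int) (l : List Int) :
    ∀ (bands : List (List (List Int))),
      (l.foldl (fun b i => PySem.List.pySetD b i (PySem.List.pyGetD b i [] ++ [point])) bands).length
      = bands.length := by
  induction l with
  | nil => intro bands; rfl
  | cons x t ih =>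
    intro bands
    simp only [List.foldl_cons, ih, PySem.List.length_pySetD]

-- elementwise effect of B's inner loop: band j gains the point iff lo ≤ j < hi
theorem rangefold_get (point : List Int) (hi : Int) :
    ∀ (d : Nat) (lo : Int), 0 ≤ lo → (hi - lo).toNat ≤ d →
      ∀ (bands : List (List (List Int))) (j : Nat), j < bands.length →
      PySem.List.pyGetD ((PySem.List.pyRange lo hi).foldl
        (fun b i => PySem.List.pySetD b i (PySem.List.pyGetD b i [] ++ [point])) bands) (↑j) []
      = if lo ≤ (j : Int) ∧ (j : Int) < hi then PySem.List.pyGetD bands (↑j) [] ++ [point]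
        else PySem.List.pyGetD bands (↑j) [] := by
  intro d
  induction d with
  | zero =>
    intro lo hlo hd bands j hj
    have hle : hi ≤ lo := by omega
    rw [PySem.List.pyRange_one_eq_nil hle]
    simp only [List.foldl_nil]
    have : ¬ (lo ≤ (j : Int) ∧ (j : Int) < hi) := by omega
    simp [this]
  | succ d ihd =>
    intro lo hlo hd bands j hj
    by_cases hlt : lo < hi
    · obtain ⟨ln, rfl⟩ : ∃ n : Nat, lo = (n : Int) := ⟨lo.toNat, by omega⟩
      rw [PySem.List.pyRange_one_cons hlt]
      simp only [List.foldl_cons]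
      rw [ihd ((ln : Int) + 1) (by omega) (by omega) _ j
        (by rw [PySem.List.length_pySetD]; exact hj)]
      by_cases hlen : ln < bands.length
      · rw [PySem.List.pyGetD_pySetD_natCast bands ln j _ [] hlen]
        by_cases hje : j = ln
        · subst hje
          have c2 : ((j : Int) ≤ (j : Int) ∧ (j : Int) < hi) := by omega
          simp [c2]
        · have : ((ln : Int) + 1 ≤ (j : Int) ∧ (j : Int) < hi) ↔
                 ((ln : Int) ≤ (j : Int) ∧ (j : Int) < hi) := by
            constructor <;> intro h <;> constructor <;> try omega
          rw [if_congr this rfl rfl]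
          simp [hje]
      · have hset : PySem.List.pySetD bands (↑ln)
            (PySem.List.pyGetD bands (↑ln) [] ++ [point]) = bands := by
          rw [PySem.List.pySetD_of_nonneg _ _ (by omega : (0:Int) ≤ (ln : Int))]
          simp only [Int.toNat_natCast]
          exact List.set_eq_of_length_le (by omega)
        rw [hset]
        have : ((ln : Int) + 1 ≤ (j : Int) ∧ (j : Int) < hi) ↔
               ((ln : Int) ≤ (j : Int) ∧ (j : Int) < hi) := by
          constructor <;> intro h <;> constructor <;> omega
        rw [if_congr this rfl rfl]
    · rw [PySem.List.pyRange_one_eq_nil (by omega)]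
      simp only [List.foldl_nil]
      have : ¬ (lo ≤ (j : Int) ∧ (j : Int) < hi) := by omega
      simp [this]

-- the per-point lower band bound of B (proof-side name for B's let-chain, zeta-reduced)
def bandLo (s : List Int) (point : List Int) : Int :=
  if (s.map (fun e => if e < PySem.List.pyGetD point 1 0 then (1 : Int) else 0)).sum - 1 < 0 then 0
  else (s.map (fun e => if e < PySem.List.pyGetD point 1 0 then (1 : Int) else 0)).sum - 1

-- the per-point upper band bound of B
def bandHi (s : List Int) (n : Int) (point : List Int) : Int :=
  if n - 1 < (s.map (fun e => if e ≤ PySem.List.pyGetD point 1 0 then (1 : Int) else 0)).sum then n - 1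
  else (s.map (fun e => if e ≤ PySem.List.pyGetD point 1 0 then (1 : Int) else 0)).sum

theorem bandLo_nonneg (s : List Int) (point : List Int) : 0 ≤ bandLo s point := by
  unfold bandLo
  split <;> omega

-- list extensionality through Python indexing
theorem ext_pyGetD {α : Type} (d : α) (xs ys : List α) (hl : xs.length = ys.length)
    (h : ∀ j : Nat, j < xs.length →
      PySem.List.pyGetD xs (↑j) d = PySem.List.pyGetD ys (↑j) d) : xs = ys := by
  apply List.ext_getElem hl
  intro j h1 h2
  have hj := h j h1
  rw [PySem.List.pyGetD_eq_getElem xs d (by omega) (by exact_mod_cast h1),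
      PySem.List.pyGetD_eq_getElem ys d (by omega) (by exact_mod_cast h2)] at hj
  simpa using hj

-- B's outer loop, characterised elementwise: band j collects, in order, the points whose range covers j
theorem pointfold_get (s : List Int) (n : Int) (pp : List (List Int)) :
    ∀ (bands : List (List (List Int))) (j : Nat), j < bands.length →
      PySem.List.pyGetD (pp.foldl
        (fun bands point =>
          let y := PySem.List.pyGetD point 1 0
          let lo0 := (s.map (fun e => if e < y then (1 : Int) else 0)).sum - 1
          let lo := if lo0 < 0 then 0 else lo0
          let hi0 := (s.map (fun e => if e ≤ y then (1 : Int) else 0)).sum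
          let hi := if n - 1 < hi0 then n - 1 else hi0
          (PySem.List.pyRange lo hi).foldl
            (fun b i => PySem.List.pySetD b i (PySem.List.pyGetD b i [] ++ [point]))
            bands)
        bands) (↑j) []
      = PySem.List.pyGetD bands (↑j) [] ++
          pp.filter (fun p => decide (bandLo s p ≤ (j : Int) ∧ (j : Int) < bandHi s n p)) := by
  induction pp with
  | nil => intro bands j hj; simp
  | cons p t ih =>
    intro bands j hj
    simp only [List.foldl_cons]
    have eLo : (if (s.map (fun e => if e < PySem.List.pyGetD p 1 0 then (1 : Int) else 0)).sum - 1 < 0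
          then (0 : Int)
          else (s.map (fun e => if e < PySem.List.pyGetD p 1 0 then (1 : Int) else 0)).sum - 1)
        = bandLo s p := rfl
    have eHi : (if n - 1 < (s.map (fun e => if e ≤ PySem.List.pyGetD p 1 0 then (1 : Int) else 0)).sum
          then n - 1
          else (s.map (fun e => if e ≤ PySem.List.pyGetD p 1 0 then (1 : Int) else 0)).sum)
        = bandHi s n p := rfl
    rw [eLo, eHi]
    rw [ih _ j (by rw [foldl_pySetD_length]; exact hj)]
    rw [rangefold_get p (bandHi s n p) (bandHi s n p - bandLo s p).toNat (bandLo s p)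
      (bandLo_nonneg s p) (le_refl _) bands j hj]
    simp only [List.filter_cons]
    by_cases hc : bandLo s p ≤ (j : Int) ∧ (j : Int) < bandHi s n p
    · rw [if_pos hc]
      have hd : decide (bandLo s p ≤ (j : Int) ∧ (j : Int) < bandHi s n p) = true := by
        simpa using hc
      rw [hd]
      simp
    · rw [if_neg hc]
      have hd : decide (bandLo s p ≤ (j : Int) ∧ (j : Int) < bandHi s n p) = false := by
        simpa using hc
      rw [hd]
      simp

-- B's outer loop preserves the number of bands
theorem pointfold_length (s : List Int) (n : Int) (pp : List (List Int)) :
    ∀ (bands : List (List (List Int))),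
      (pp.foldl
        (fun bands point =>
          let y := PySem.List.pyGetD point 1 0
          let lo0 := (s.map (fun e => if e < y then (1 : Int) else 0)).sum - 1
          let lo := if lo0 < 0 then 0 else lo0
          let hi0 := (s.map (fun e => if e ≤ y then (1 : Int) else 0)).sum
          let hi := if n - 1 < hi0 then n - 1 else hi0
          (PySem.List.pyRange lo hi).foldl
            (fun b i => PySem.List.pySetD b i (PySem.List.pyGetD b i [] ++ [point]))
            bands)
        bands).length = bands.length := by
  induction pp with
  | nil => intro bands; rfl
  | cons p t ih =>
    intro bands
    simp only [List.foldl_cons, ih, foldl_pySetD_length]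

-- a 0/1 Int sum over s is a countP
theorem sum_ite_lt (s : List Int) (y : Int) :
    (s.map (fun e => if e < y then (1 : Int) else 0)).sum
    = (s.countP (fun e => decide (e < y)) : Int) := by
  rw [show (fun e => if e < y then (1 : Int) else 0)
      = (fun e => if (fun e => decide (e < y)) e = true then (1 : Int) else 0)
      from funext fun e => by simp]
  exact PySem.List.sum_map_ite_one_zero _ _

theorem sum_ite_le (s : List Int) (y : Int) :
    (s.map (fun e => if e ≤ y then (1 : Int) else 0)).sum
    = (s.countP (fun e => decide (e ≤ y)) : Int) := by
  rw [show (fun e => if e ≤ y then (1 : Int) else 0)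
      = (fun e => if (fun e => decide (e ≤ y)) e = true then (1 : Int) else 0)
      from funext fun e => by simp]
  exact PySem.List.sum_map_ite_one_zero _ _

-- A's band-j predicate agrees with B's band-range predicate, on a sorted s, for j < |s| - 1
theorem pred_equiv (s : List Int) (hs : s.Pairwise (fun a b => a ≤ b))
    (j : Nat) (hj : j + 1 < s.length) (p : List Int) :
    (PySem.List.pyGetD s (↑j) 0 ≤ PySem.List.pyGetD p 1 0 ∧
       PySem.List.pyGetD p 1 0 ≤ PySem.List.pyGetD s ((↑j) + 1) 0)
    ↔ (bandLo s p ≤ (j : Int) ∧ (j : Int) < bandHi s (s.length : Int) p) := by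
  set y := PySem.List.pyGetD p 1 0 with hy
  have hjs : j < s.length := by omega
  rw [PySem.List.pyGetD_eq_getElem s 0 (by omega) (by exact_mod_cast hjs)]
  have : ((j : Int) + 1) = ((j + 1 : Nat) : Int) := by push_cast; ring
  rw [this, PySem.List.pyGetD_eq_getElem s 0 (by omega) (by exact_mod_cast hj)]
  simp only [Int.toNat_natCast]
  rw [sorted_le_iff_lt_countP s y hs j hjs, sorted_ge_iff_countP_le s y hs (j + 1) hj]
  unfold bandLo bandHi
  rw [← hy, sum_ite_lt, sum_ite_le]
  have hcle : s.countP (fun e => decide (e ≤ y)) ≤ s.length := List.countP_le_length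
  split_ifs <;> omega

-- ===== VERDICT (by name: the statement is the Claim_ definition above) =====
theorem assign_block_points_spec : Claim_equal_assign_block_points := by
  intro pp se _hdom _hpre
  unfold Spec_assign_block_points assign_block_points assign_block_points_alt
  simp only []
  set s := PySem.List.sorted se (fun x => x) with hsdef
  have hs : s.Pairwise (fun a b => a ≤ b) := PySem.List.sorted_pairwise se (fun x => x)
  by_cases hn : (s.length : Int) < 2
  · rw [if_pos hn, PySem.List.pyRange_one_eq_nil (by omega)]
    rfl
  · rw [if_neg hn]
    rw [PySem.List.foldl_append_singleton_eq_map]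
    simp only [List.nil_append]
    apply ext_pyGetD ([] : List (List Int))
    · simp only [List.length_map, PySem.List.length_pyRange_one, pointfold_length,
        List.length_replicate]
      omega
    · intro j hja
      simp only [List.length_map, PySem.List.length_pyRange_one] at hja
      have hjlen : (j : Int) < (s.length : Int) - 1 := by omega
      have hjb' : j < (List.replicate ((s.length : Int) - 1).toNat
          ([] : List (List Int))).length := by
        simp only [List.length_replicate]; omega
      rw [PySem.List.pyGetD_map_pyRange_one _ 0 ((s.length : Int) - 1) j
        ([] : List (List Int)) (by omega)]
      rw [pointfold_get s (s.length : Int) pp _ j hjb']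
      have hrep : PySem.List.pyGetD (List.replicate ((s.length : Int) - 1).toNat
          ([] : List (List Int))) (↑j) [] = [] := by
        rw [PySem.List.pyGetD_eq_getElem _ _ (by omega) (by simpa using hjb')]
        simp
      rw [hrep, List.nil_append]
      simp only [zero_add]
      have hconv : (fun (polygon : List (List Int)) (point : List Int) =>
          if PySem.List.pyGetD s ((j : Int)) 0 ≤ PySem.List.pyGetD point 1 0 ∧
             PySem.List.pyGetD point 1 0 ≤ PySem.List.pyGetD s ((j : Int) + 1) 0
          then polygon ++ [point] else polygon)
          = (fun polygon point =>
            if (fun pt => decide (PySem.List.pyGetD s ((j : Int)) 0 ≤ PySem.List.pyGetD pt 1 0 ∧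
               PySem.List.pyGetD pt 1 0 ≤ PySem.List.pyGetD s ((j : Int) + 1) 0)) point = true
            then polygon ++ [(fun (pt : List Int) => pt) point] else polygon) := by
        funext a b
        simp
      rw [hconv, PySem.List.foldl_append_if, List.nil_append, List.map_id'']
      apply List.filter_congr
      intro p _
      have hpe := pred_equiv s hs j (by omega) p
      simp only [decide_eq_decide]
      exact hpe
      intro x
      rfl
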